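-- pv_equiv track=rewrite | github.com/git-cst/advent_of_code | 2024/14/day14.py | check_robot
-- ===== SOURCE A (Python) =====
-- def check_robot(positions: set[tuple[int, int]], neighbour_position: tuple[int, int], direction: str) -> bool:
--     direction_modifier = {
--         'north' : (0, 1),
--         'east'  : (1, 0),
--         'south' : (0, -1),
--         'west'  : (-1, 0)
--     }
--
--     curr_x, curr_y = neighbour_position
--     delta_x, delta_y = direction_modifier[direction]
--
--     robots_in_a_row = 1
--     for _ in range(0, 10):
--         position_to_check = (curr_x + delta_x, curr_y + delta_y)
--         if position_to_check in positions:
--             curr_x, curr_y = position_to_check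
--             robots_in_a_row += 1
--             continue
--         else:
--             break
--     return robots_in_a_row >= 8
-- ===== SOURCE B (Python) =====
-- def check_robot(positions: set[tuple[int, int]], neighbour_position: tuple[int, int], direction: str) -> bool:
--     direction_modifier = {
--         'north' : (0, 1),
--         'east'  : (1, 0),
--         'south' : (0, -1),
--         'west'  : (-1, 0)
--     }
--     dx, dy = direction_modifier[direction]
--     x, y = neighbour_position
--     # project every robot onto the ray: collinear iff cross product is 0,
--     # its signed step along the ray is the dot product with (dx, dy)
--     offsets = set()
--     for px, py in positions:
--         if (px - x) * dy == (py - y) * dx: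
--             offsets.add((px - x) * dx + (py - y) * dy)
--     return set(range(1, 8)).issubset(offsets)
-- ===== Notes on version B (the rewrite author's own statement) =====
-- stated objective: alternative
-- what changed: Instead of A's step-by-step walk with a counter and early break, B makes one scan over positions, projecting each robot onto the ray (cross-product collinearity test, dot-product offset) to build the set of occupied steps, and returns whether {1..7} is a subset of that set.
import Mathlib
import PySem

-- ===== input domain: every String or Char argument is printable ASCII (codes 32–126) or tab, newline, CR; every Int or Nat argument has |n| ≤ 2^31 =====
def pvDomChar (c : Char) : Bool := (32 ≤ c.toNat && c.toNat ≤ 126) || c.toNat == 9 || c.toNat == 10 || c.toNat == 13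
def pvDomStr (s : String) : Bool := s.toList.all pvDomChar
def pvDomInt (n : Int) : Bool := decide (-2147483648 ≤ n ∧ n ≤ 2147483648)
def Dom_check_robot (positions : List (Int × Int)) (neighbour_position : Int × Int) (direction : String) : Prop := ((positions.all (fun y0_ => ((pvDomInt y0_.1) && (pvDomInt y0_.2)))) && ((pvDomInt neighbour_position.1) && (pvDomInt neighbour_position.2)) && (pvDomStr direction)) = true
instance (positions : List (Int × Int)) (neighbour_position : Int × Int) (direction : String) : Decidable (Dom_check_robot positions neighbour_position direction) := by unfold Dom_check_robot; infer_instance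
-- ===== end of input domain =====

-- B replaces A's walk-and-count loop by one scan over positions that projects
-- each robot onto the ray and checks {1..7} ⊆ occupied offsets (objective: alternative).

-- ===== PORT A =====
-- the dict literal of A
def pvDirModifier : PySem.Dict String (Int × Int) :=
  ((((PySem.Dict.empty).insert "north" (0, 1)).insert "east" (1, 0)).insert "south" (0, -1)).insert "west" (-1, 0)

-- the for-loop of A: fuel = remaining iterations of range(0, 10)
def pvChkLoop (positions : List (Int × Int)) (dx dy cx cy : Int) (count : Int) : Nat → Int
  | 0 => count
  | n+1 =>
    let p := (cx + dx, cy + dy)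
    if p ∈ positions then pvChkLoop positions dx dy p.1 p.2 (count + 1) n
    else count

def check_robot (positions : List (Int × Int)) (neighbour_position : Int × Int) (direction : String) : Bool :=
  match pvDirModifier.get? direction with
  | none => false   -- KeyError in Python; excluded by Pre_check_robot
  | some (dx, dy) =>
    decide (8 ≤ pvChkLoop positions dx dy neighbour_position.1 neighbour_position.2 1 10)

-- ===== PORT B =====
-- B's loop: for (px, py) in positions: if cross == 0: offsets.add(dot)
def pvOffsets (positions : List (Int × Int)) (x y dx dy : Int) : PySem.Set Int :=
  positions.foldl
    (fun s p => if (p.1 - x) * dy = (p.2 - y) * dx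
                then PySem.Set.add s ((p.1 - x) * dx + (p.2 - y) * dy) else s)
    PySem.Set.empty

def check_robot_alt (positions : List (Int × Int)) (neighbour_position : Int × Int) (direction : String) : Bool :=
  match pvDirModifier.get? direction with
  | none => false   -- KeyError in Python; excluded by Pre_check_robot
  | some (dx, dy) =>
    PySem.Set.issubset (PySem.Set.ofList (PySem.List.pyRange 1 8 1))
      (pvOffsets positions neighbour_position.1 neighbour_position.2 dx dy)

-- ===== PRECONDITION & SPEC =====
-- Pre_ excludes exactly the directions outside the dict, on which Python A raises KeyError.
def Pre_check_robot (positions : List (Int × Int)) (neighbour_position : Int × Int) (direction : String) : Prop :=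
  direction = "north" ∨ direction = "east" ∨ direction = "south" ∨ direction = "west"
instance (positions : List (Int × Int)) (neighbour_position : Int × Int) (direction : String) : Decidable (Pre_check_robot positions neighbour_position direction) := by unfold Pre_check_robot; infer_instance

def pvWitness_check_robot : (List (Int × Int)) × (Int × Int) × String := ([(1, 2), (1, 3)], (1, 1), "north")

def Spec_check_robot (positions : List (Int × Int)) (neighbour_position : Int × Int) (direction : String) (out : Bool) : Prop := out = check_robot_alt positions neighbour_position direction
instance (positions : List (Int × Int)) (neighbour_position : Int × Int) (direction : String) (out : Bool) : Decidable (Spec_check_robot positions neighbour_position direction out) := by unfold Spec_check_robot; infer_instance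

-- ===== CLAIM (what is proved, stated in full; the proofs are below) =====
def Claim_equal_check_robot : Prop := ∀ (positions : List (Int × Int)) (neighbour_position : Int × Int) (direction : String), Dom_check_robot positions neighbour_position direction → Pre_check_robot positions neighbour_position direction → Spec_check_robot positions neighbour_position direction (check_robot positions neighbour_position direction)

-- ===== LEMMAS AND PROOFS =====
-- A's loop result ≥ 8 iff the 7 consecutive positions at steps 1..7 are all present
set_option maxHeartbeats 1000000 in
theorem pvChkLoop_eq_all (ps : List (Int × Int)) (dx dy cx cy : Int) :
    decide (8 ≤ pvChkLoop ps dx dy cx cy 1 10)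
      = (PySem.List.pyRange 1 8 1).all (fun i => decide ((cx + i * dx, cy + i * dy) ∈ ps)) := by
  have h : PySem.List.pyRange 1 8 1 = [1, 2, 3, 4, 5, 6, 7] := by decide
  rw [h]
  simp only [pvChkLoop, List.all_cons, List.all_nil, one_mul]
  ring_nf
  split_ifs <;> simp_all

-- membership in the fold that builds B's offset set
theorem mem_pvOffsets_fold (ps : List (Int × Int)) (x y dx dy t : Int) (s : PySem.Set Int) :
    t ∈ ps.foldl
        (fun s p => if (p.1 - x) * dy = (p.2 - y) * dx
                    then PySem.Set.add s ((p.1 - x) * dx + (p.2 - y) * dy) else s) s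
      ↔ t ∈ s ∨ ∃ p ∈ ps, (p.1 - x) * dy = (p.2 - y) * dx ∧ (p.1 - x) * dx + (p.2 - y) * dy = t := by
  induction ps generalizing s with
  | nil => simp
  | cons q qs ih =>
    simp only [List.foldl_cons]
    by_cases hq : (q.1 - x) * dy = (q.2 - y) * dx
    · rw [if_pos hq, ih]
      simp only [PySem.Set.mem_add, List.mem_cons]
      constructor
      · rintro ((h | h) | ⟨p, hp, hc, hv⟩)
        · exact Or.inl h
        · exact Or.inr ⟨q, Or.inl rfl, hq, h.symm⟩
        · exact Or.inr ⟨p, Or.inr hp, hc, hv⟩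
      · rintro (h | ⟨p, (rfl | hp), hc, hv⟩)
        · exact Or.inl (Or.inl h)
        · exact Or.inl (Or.inr hv.symm)
        · exact Or.inr ⟨p, hp, hc, hv⟩
    · rw [if_neg hq, ih]
      simp only [List.mem_cons]
      constructor
      · rintro (h | ⟨p, hp, hc, hv⟩)
        · exact Or.inl h
        · exact Or.inr ⟨p, Or.inr hp, hc, hv⟩
      · rintro (h | ⟨p, (rfl | hp), hc, hv⟩)
        · exact Or.inl h
        · exact absurd hc hq
        · exact Or.inr ⟨p, hp, hc, hv⟩

-- for a unit axis direction, a robot projects to offset t iff it IS the point t steps along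
theorem mem_pvOffsets (ps : List (Int × Int)) (x y dx dy t : Int)
    (hu : (dx = 0 ∧ (dy = 1 ∨ dy = -1)) ∨ (dy = 0 ∧ (dx = 1 ∨ dx = -1))) :
    t ∈ pvOffsets ps x y dx dy ↔ (x + t * dx, y + t * dy) ∈ ps := by
  unfold pvOffsets
  rw [mem_pvOffsets_fold]
  simp only [PySem.Set.empty, List.not_mem_nil, false_or]
  constructor
  · rintro ⟨⟨p1, p2⟩, hp, hc, hv⟩
    have key : (x + t * dx, y + t * dy) = (p1, p2) := by
      rcases hu with ⟨rfl, rfl | rfl⟩ | ⟨rfl, rfl | rfl⟩ <;>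
        (simp only [mul_zero, mul_one, mul_neg_one, add_zero, zero_add,
          Prod.mk.injEq] at hc hv ⊢ ; omega)
    rw [key]; exact hp
  · intro h
    refine ⟨(x + t * dx, y + t * dy), h, ?_, ?_⟩ <;>
      rcases hu with ⟨rfl, rfl | rfl⟩ | ⟨rfl, rfl | rfl⟩ <;> ring
-- B's subset test equals the all-present check over steps 1..7
theorem alt_eq_all (ps : List (Int × Int)) (x y dx dy : Int)
    (hu : (dx = 0 ∧ (dy = 1 ∨ dy = -1)) ∨ (dy = 0 ∧ (dx = 1 ∨ dx = -1))) :
    PySem.Set.issubset (PySem.Set.ofList (PySem.List.pyRange 1 8 1)) (pvOffsets ps x y dx dy)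
      = (PySem.List.pyRange 1 8 1).all (fun i => decide ((x + i * dx, y + i * dy) ∈ ps)) := by
  rw [Bool.eq_iff_iff, PySem.Set.issubset_iff, List.all_eq_true]
  constructor
  · intro h i hi
    have := h i (by rw [PySem.Set.mem_ofList]; exact hi)
    rw [mem_pvOffsets ps x y dx dy i hu] at this
    simpa using this
  · intro h i hi
    rw [PySem.Set.mem_ofList] at hi
    rw [mem_pvOffsets ps x y dx dy i hu]
    simpa using h i hi

-- ===== VERDICT (by name: the statement is the Claim_ definition above) =====
theorem check_robot_spec : Claim_equal_check_robot := by
  intro ps np dir _ hpre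
  unfold Spec_check_robot check_robot check_robot_alt
  rcases hpre with h | h | h | h <;> subst h <;>
  · show decide _ = PySem.Set.issubset _ _
    rw [pvChkLoop_eq_all, alt_eq_all] <;> simp
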